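-- pv_equiv track=rewrite | github.com/dutta/diamondKineticsCoding | dk.py | getEventFrame
-- ===== SOURCE A (Python) =====
-- def getEventFrame(dscol):
--     maxSoFar = 0
--     maxInd = -1
--     for i in range(1,len(dscol)):
--         diff = abs(dscol[i]-dscol[i-1])
--         if(diff > maxSoFar):
--             maxSoFar = diff
--             maxInd = i
--     return maxInd
-- ===== SOURCE B (Python) =====
-- def getEventFrame(dscol):
--     diffs = [abs(dscol[i] - dscol[i - 1]) for i in range(1, len(dscol))]
--     if not diffs:
--         return -1
--     m = max(diffs)
--     return diffs.index(m) + 1 if m > 0 else -1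
-- ===== Notes on version B (the rewrite author's own statement) =====
-- stated objective: simpler
-- what changed: A's fused single scan carrying (maxSoFar, maxInd) state is split into building the table of consecutive absolute differences, then max() and a first-occurrence index() lookup; the m>0 test reproduces the -1-when-no-positive-difference behaviour.
import Mathlib
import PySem

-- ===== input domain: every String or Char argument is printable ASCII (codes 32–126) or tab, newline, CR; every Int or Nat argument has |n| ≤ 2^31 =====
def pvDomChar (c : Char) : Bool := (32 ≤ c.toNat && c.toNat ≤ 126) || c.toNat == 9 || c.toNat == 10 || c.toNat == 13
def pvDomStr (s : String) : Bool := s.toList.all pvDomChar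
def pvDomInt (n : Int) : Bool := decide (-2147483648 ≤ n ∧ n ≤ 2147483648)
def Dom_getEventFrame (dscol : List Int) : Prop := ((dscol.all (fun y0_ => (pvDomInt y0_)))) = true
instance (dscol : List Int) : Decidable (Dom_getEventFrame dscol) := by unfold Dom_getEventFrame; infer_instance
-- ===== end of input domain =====

-- B replaces A's fused running-max scan by a diffs table plus max()/first-index() lookup (objective: simpler).

-- ===== PORT A =====
-- A's loop: state (maxSoFar, maxInd), updated on strictly larger consecutive |difference|.
def getEventFrame (dscol : List Int) : Int :=
  ((PySem.List.pyRange 1 (PySem.List.len dscol) 1).foldl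
    (fun (s : Int × Int) i =>
      let diff := |PySem.List.pyGetD dscol i 0 - PySem.List.pyGetD dscol (i - 1) 0|
      if diff > s.1 then (diff, i) else s)
    (0, -1)).2

-- ===== PORT B =====
-- B: build the diffs table, then max (Python max raises on []; guarded by the emptiness test) and first index.
def getEventFrame_alt (dscol : List Int) : Int :=
  let diffs := (PySem.List.pyRange 1 (PySem.List.len dscol) 1).map
    (fun i => |PySem.List.pyGetD dscol i 0 - PySem.List.pyGetD dscol (i - 1) 0|)
  match PySem.List.max? diffs (fun y => y) with
  | none => -1
  | some m => if m > 0 then ((PySem.List.index? diffs m).getD 0 : Int) + 1 else -1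

-- ===== PRECONDITION & SPEC =====
def Spec_getEventFrame (dscol : List Int) (out : Int) : Prop := out = getEventFrame_alt dscol
instance (dscol : List Int) (out : Int) : Decidable (Spec_getEventFrame dscol out) := by unfold Spec_getEventFrame; infer_instance

-- ===== CLAIM (what is proved, stated in full; the proofs are below) =====
def Claim_equal_getEventFrame : Prop := ∀ (dscol : List Int), Dom_getEventFrame dscol → Spec_getEventFrame dscol (getEventFrame dscol)

-- ===== LEMMAS AND PROOFS =====

-- the running max of a nonneg-started fold is the start or an element
lemma foldl_max_mem_or (l : List Int) (a : Int) :
    l.foldl max a = a ∨ l.foldl max a ∈ l := by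
  induction l generalizing a with
  | nil => exact Or.inl rfl
  | cons x t ih =>
    rcases ih (max a x) with h | h
    · rcases le_total x a with hx | hx
      · exact Or.inl (by simp only [List.foldl_cons]; rwa [max_eq_left hx] at h ⊢)
      · have h' : List.foldl max x t = x := by rwa [max_eq_right hx] at h
        exact Or.inr (by simp [List.foldl_cons, max_eq_right hx, h'])
    · exact Or.inr (by simp [List.foldl_cons, h])

-- A's fold over range(1, n) computes exactly B's (max, guarded first-index) pair
lemma main_inv (f : Int → Int) (n : Nat) :
    (PySem.List.pyRange 1 (n : Int) 1).foldl
      (fun (s : Int × Int) i => if f i > s.1 then (f i, i) else s) (0, -1)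
    = (((PySem.List.pyRange 1 (n : Int) 1).map f).foldl max 0,
       if ((PySem.List.pyRange 1 (n : Int) 1).map f).foldl max 0 > 0 then
         ((PySem.List.index? ((PySem.List.pyRange 1 (n : Int) 1).map f)
            (((PySem.List.pyRange 1 (n : Int) 1).map f).foldl max 0)).getD 0 : Int) + 1
       else -1) := by
  induction n with
  | zero => simp [PySem.List.pyRange_one_eq_nil (by norm_num : (0:Int) ≤ 1)]
  | succ n ih =>
    rcases Nat.eq_zero_or_pos n with rfl | hn
    · simp [PySem.List.pyRange_one_eq_nil]
    · have h1 : (1 : Int) ≤ (n : Int) := by exact_mod_cast hn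
      have hsplit : PySem.List.pyRange 1 ((n+1 : Nat) : Int) 1
          = PySem.List.pyRange 1 (n : Int) 1 ++ [(n : Int)] := by
        have := PySem.List.pyRange_one_succ_right (a := 1) (b := (n : Int)) h1
        simpa [Nat.cast_add, Nat.cast_one] using this
      set L := PySem.List.pyRange 1 (n : Int) 1 with hL
      set ds := L.map f with hds
      set M := ds.foldl max 0 with hM
      have hboth := PySem.List.le_foldl_max ds (0 : Int)
      have hM0 : 0 ≤ M := hM ▸ hboth.1
      have hle : ∀ y ∈ ds, y ≤ M := hM ▸ hboth.2
      have hlenL : L.length = n - 1 := by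
        simpa [hL] using PySem.List.length_pyRange_one (a := (1:Int)) (b := (n : Int))
      rw [hsplit, List.foldl_append, List.map_append, List.foldl_append, ih]
      simp only [List.foldl_cons, List.foldl_nil, List.map_cons, List.map_nil]
      rw [← hds, ← hM]
      by_cases hgt : f (n : Int) > M
      · have hnot : f (n : Int) ∉ ds := fun hmem => absurd (hle _ hmem) (by omega)
        have hidx : PySem.List.index? (ds ++ [f (n : Int)]) (f (n : Int)) = some ds.length :=
          PySem.List.index?_append_singleton_self _ _ hnot
        have hmax : max M (f (n : Int)) = f (n : Int) := max_eq_right (le_of_lt hgt)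
        have hlen : ds.length = n - 1 := by simp [hds, hlenL]
        have hpos : f (n : Int) > 0 := lt_of_le_of_lt hM0 hgt
        simp only [if_pos hgt, hmax, hidx, if_pos hpos, Option.getD_some]
        have : ((ds.length : Int)) + 1 = (n : Int) := by
          rw [hlen]; push_cast [Nat.cast_sub hn]; ring
        simp [this]
      · have hmax : max M (f (n : Int)) = M := max_eq_left (by omega)
        simp only [if_neg hgt, hmax]
        by_cases hMp : M > 0
        · have hmem : M ∈ ds := by
            rcases foldl_max_mem_or ds 0 with h | h
            · exfalso; rw [← hM] at h; omega
            · exact hM ▸ h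
          rw [PySem.List.index?_append_of_mem _ hmem]
        · simp [hMp]

-- bridge from B's max?-on-nonempty to the foldl-max-from-0 form (elements nonneg)
lemma alt_eq_inv (dscol : List Int) :
    getEventFrame_alt dscol
    = (if (((PySem.List.pyRange 1 (PySem.List.len dscol) 1).map
          (fun i => |PySem.List.pyGetD dscol i 0 - PySem.List.pyGetD dscol (i - 1) 0|)).foldl max 0) > 0 then
        ((PySem.List.index? ((PySem.List.pyRange 1 (PySem.List.len dscol) 1).map
            (fun i => |PySem.List.pyGetD dscol i 0 - PySem.List.pyGetD dscol (i - 1) 0|))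
          (((PySem.List.pyRange 1 (PySem.List.len dscol) 1).map
            (fun i => |PySem.List.pyGetD dscol i 0 - PySem.List.pyGetD dscol (i - 1) 0|)).foldl max 0)).getD 0 : Int) + 1
       else -1) := by
  unfold getEventFrame_alt
  set ds := (PySem.List.pyRange 1 (PySem.List.len dscol) 1).map
      (fun i => |PySem.List.pyGetD dscol i 0 - PySem.List.pyGetD dscol (i - 1) 0|) with hds
  cases hc : ds with
  | nil => simp [PySem.List.max?]
  | cons x t =>
    have hx : 0 ≤ x := by
      have : x ∈ ds := by rw [hc]; exact List.mem_cons_self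
      rcases List.mem_map.mp (hds ▸ this) with ⟨i, _, hi⟩
      rw [← hi]; exact abs_nonneg _
    have hfold : ds.foldl max 0 = t.foldl max x := by
      rw [hc]; simp [List.foldl_cons, max_eq_right hx]
    show (match PySem.List.max? (x :: t) (fun y => y) with
      | none => (-1 : Int)
      | some m => if m > 0 then ((PySem.List.index? (x :: t) m).getD 0 : Int) + 1 else -1) = _
    rw [PySem.List.max?_id_cons, ← hfold, ← hc]

-- ===== VERDICT (by name: the statement is the Claim_ definition above) =====
theorem getEventFrame_spec : Claim_equal_getEventFrame := by
  intro dscol _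
  unfold Spec_getEventFrame getEventFrame
  rw [alt_eq_inv]
  have hlen : PySem.List.len dscol = ((dscol.length : Nat) : Int) := by
    simp [PySem.List.len]
  rw [hlen]
  have := main_inv (fun i => |PySem.List.pyGetD dscol i 0 - PySem.List.pyGetD dscol (i - 1) 0|)
      dscol.length
  rw [this]
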